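-- pv_equiv track=rewrite | github.com/gudals113/Algorithms | kakao/kakao-blind-2019/kakao-blind-2019-5.py | solution
-- ===== SOURCE A (Python) =====
-- def solution(food_times, k):
--     answer = -1
--     N = len(food_times)
--     sorted_food_times=[]
--
--     for i in range(N):
--         sorted_food_times.append([food_times[i],i])
--     sorted_food_times.sort(key=lambda x:(x[0],x[1]))
--
--     deleted={}
--     #남은 가짓수
--     left = N
--     # 지금 까지 먹은 횟수
--     tmp = 0
--     # 이전 최솟값
--     before = 0
--     for i in range(N):
--         minVal = sorted_food_times[i][0]
--
--         if tmp + left*(minVal-before) <= k: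
--             tmp += left*(minVal-before)
--
--             deleted[ sorted_food_times[i][1] ]=1
--
--             left-=1
--
--             before = minVal
--
--         else:
--             break
--
--     k = k-tmp
--
--
--     if k<0 or left<=0 :
--         return -1
--
--     k = k%left
--     # k번째 수 찾기 0-idx로
--     now = -1
--     for i in range(N):
--         if i in deleted :
--             continue
--         else:
--             now+=1
--
--         if now==k:
--             answer = i+1
--             break
--
--     return answer
-- ===== SOURCE B (Python) =====
-- def solution(food_times, k):
--     # Layer-by-layer consumption without sorting: repeatedly pay for the cheapest
--     # remaining layer (min of what's left) and filter it out; then pick by modulo.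
--     remaining = list(enumerate(food_times))  # (original index, time), original order
--     prev = 0
--     while remaining:
--         m = min(t for _, t in remaining)
--         cost = len(remaining) * (m - prev)
--         if k < cost:
--             break
--         k -= cost
--         prev = m
--         remaining = [(i, t) for i, t in remaining if t != m]
--     if k < 0 or not remaining:
--         return -1
--     return remaining[k % len(remaining)][0] + 1
-- ===== Notes on version B (the rewrite author's own statement) =====
-- stated objective: alternative
-- what changed: B replaces A's sort-by-(value,index) pass, deletion dict and final index scan by a sort-free loop that repeatedly pays for the cheapest remaining layer (min of the unsorted remainder) and filters that layer out, then answers directly by indexing the surviving (index, time) list with k modulo its length; with many distinct time values this does more passes than A's single sort.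
import Mathlib
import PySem

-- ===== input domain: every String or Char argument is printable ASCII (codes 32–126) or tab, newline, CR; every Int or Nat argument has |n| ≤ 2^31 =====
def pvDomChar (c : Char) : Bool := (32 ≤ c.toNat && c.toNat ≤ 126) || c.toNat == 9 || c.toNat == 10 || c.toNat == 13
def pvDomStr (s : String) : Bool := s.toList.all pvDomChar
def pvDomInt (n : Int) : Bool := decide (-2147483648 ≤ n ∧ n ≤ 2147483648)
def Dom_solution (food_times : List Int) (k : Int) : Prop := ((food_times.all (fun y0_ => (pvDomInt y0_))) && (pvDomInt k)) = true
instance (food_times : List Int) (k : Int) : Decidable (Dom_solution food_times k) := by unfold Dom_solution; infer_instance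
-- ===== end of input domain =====

-- B replaces A's sort + dict bookkeeping by repeated min-layer filtering on the
-- unsorted list (objective: alternative algorithm, similar cost; not claimed faster).

-- ===== PORT A =====
-- A's consuming loop over the sorted (value, index) pairs (for i in range(N) with break)
def loopA (k : Int) : List (Int × Int) → Int → Int → Int → PySem.Dict Int Int → Int × Int × PySem.Dict Int Int
  | [], tmp, left, _before, deleted => (tmp, left, deleted)
  | (minVal, idx) :: rest, tmp, left, before, deleted =>
    if tmp + left * (minVal - before) ≤ k then
      loopA k rest (tmp + left * (minVal - before)) (left - 1) minVal (deleted.insert idx 1)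
    else
      (tmp, left, deleted)

-- A's final scan (for i in range(N) with continue / break)
def scanA (deleted : PySem.Dict Int Int) (kk : Int) : List Nat → Int → Int → Int
  | [], _now, answer => answer
  | i :: rest, now, answer =>
    if deleted.contains (i : Int) then
      scanA deleted kk rest now answer
    else if now + 1 = kk then (i : Int) + 1
    else scanA deleted kk rest (now + 1) answer

def solution (food_times : List Int) (k : Int) : Int :=
  let N := food_times.length
  -- for i in range(N): append([food_times[i], i]); then .sort(key=lambda x:(x[0],x[1]))
  -- — the tuple key is Python's lexicographic order, ported as the Lex order on pairs
  let sorted_food_times :=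
    PySem.List.sorted ((List.range N).map (fun i : Nat => (PySem.List.pyGetD food_times (i : Int) 0, (i : Int)))) (fun x => toLex x) false
  match loopA k sorted_food_times 0 (N : Int) 0 PySem.Dict.empty with
  | (tmp, left, deleted) =>
    if k - tmp < 0 ∨ left ≤ 0 then -1
    else scanA deleted (PySem.Int.mod (k - tmp) left) (List.range N) (-1) (-1)

-- ===== PORT B =====
-- B's layer loop: pay for the cheapest remaining layer, filter it out, repeat
def loopB : List (Int × Int) → Int → Int → Int × List (Int × Int)
  | [], _prev, k => (k, [])
  | p :: rest, prev, k =>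
    let m := (PySem.List.min? ((p :: rest).map (·.2)) (fun t => t)).getD 0
    let cost := ((p :: rest).length : Int) * (m - prev)
    if k < cost then (k, p :: rest)
    else loopB ((p :: rest).filter (fun q => !(q.2 == m))) m (k - cost)
  termination_by R _ _ => R.length
  decreasing_by
    obtain ⟨mv, hmo⟩ : ∃ mv, PySem.List.min? ((p :: rest).map (·.2)) (fun t => t) = some mv := by
      cases h : PySem.List.min? ((p :: rest).map (·.2)) (fun t => t)
      · exact absurd h (by simp [PySem.List.min?_eq_none_iff])
      · exact ⟨_, rfl⟩
    refine List.length_filter_lt_length_iff_exists.mpr ?_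
    rcases List.mem_map.mp (PySem.List.min?_mem hmo) with ⟨q, hq, hq2⟩
    simp only [List.map_cons] at hmo
    exact ⟨q, hq, by simp [hmo, hq2]⟩

def solution_alt (food_times : List Int) (k : Int) : Int :=
  let remaining := PySem.List.enumerate food_times
  match loopB remaining 0 k with
  | (k', r) =>
    if k' < 0 ∨ r = [] then -1
    else ((PySem.List.pyGet? r (PySem.Int.mod k' (r.length : Int))).getD (0, 0)).1 + 1

-- ===== PRECONDITION & SPEC =====
def Spec_solution (food_times : List Int) (k : Int) (out : Int) : Prop := out = solution_alt food_times k
instance (food_times : List Int) (k : Int) (out : Int) : Decidable (Spec_solution food_times k out) := by unfold Spec_solution; infer_instance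

-- ===== CLAIM (what is proved, stated in full; the proofs are below) =====
def Claim_equal_solution : Prop := ∀ (food_times : List Int) (k : Int), Dom_solution food_times k → Spec_solution food_times k (solution food_times k)

-- ===== LEMMAS AND PROOFS =====

-- abbreviation used by the proofs (not by the ports)
def sortA (l : List (Int × Int)) : List (Int × Int) := PySem.List.sorted l (fun x => toLex x) false

def swapP (p : Int × Int) : Int × Int := (p.2, p.1)

-- loopB's surviving list is a sublist (order-preserving subset) of its input
theorem loopB_sublist (R : List (Int × Int)) (prev k : Int) : (loopB R prev k).2.Sublist R := by
  fun_induction loopB R prev k with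
  | case1 => exact List.Sublist.refl _
  | case2 p rest prev k m cost h => exact List.Sublist.refl _
  | case3 p rest prev k m cost h ih => exact ih.trans (List.filter_sublist)

-- dict after a fold of inserts: membership
theorem contains_foldl_insert (idxs : List Int) (d : PySem.Dict Int Int) (j : Int) :
    (idxs.foldl (fun d i => d.insert i 1) d).contains j = true ↔ d.contains j = true ∨ j ∈ idxs := by
  induction idxs generalizing d with
  | nil => simp
  | cons i is ih =>
    simp only [List.foldl_cons, ih, PySem.Dict.contains_insert, List.mem_cons]
    simp only [Bool.or_eq_true, beq_iff_eq]
    tauto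

-- a list whose first components are all m is determined by its second components
theorem eq_map_of_fst_const (l : List (Int × Int)) (m : Int) (h : ∀ p ∈ l, p.1 = m) :
    l = (l.map (·.2)).map (fun i => (m, i)) := by
  induction l with
  | nil => rfl
  | cons p t ih =>
    have hp := h p (List.mem_cons_self ..)
    simp only [List.map_cons]
    refine congrArg₂ _ ?_ (ih (fun q hq => h q (List.mem_cons_of_mem _ hq)))
    exact Prod.ext (by simpa using hp) rfl

-- A's loop consumes a whole group of equal minimal values (tail of the group: before = m)
theorem loopA_group_tail (k m : Int) (idxs : List Int) (rest : List (Int × Int))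
    (tmp left : Int) (d : PySem.Dict Int Int) (h : tmp ≤ k) :
    loopA k (idxs.map (fun i => (m, i)) ++ rest) tmp left m d
      = loopA k rest tmp (left - idxs.length) m (idxs.foldl (fun d i => d.insert i 1) d) := by
  induction idxs generalizing left d with
  | nil => simp
  | cons i is ih =>
    simp only [List.map_cons, List.cons_append, loopA, sub_self, mul_zero, add_zero, if_pos h,
      List.foldl_cons]
    rw [ih (left - 1) (d.insert i 1)]
    congr 1
    simp only [List.length_cons]
    push_cast
    omega

-- A's loop consumes a whole nonempty group of equal minimal values
theorem loopA_group (k m prev : Int) (idxs : List Int) (hne : idxs ≠ []) (rest : List (Int × Int))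
    (tmp left : Int) (d : PySem.Dict Int Int) (h : tmp + left * (m - prev) ≤ k) :
    loopA k (idxs.map (fun i => (m, i)) ++ rest) tmp left prev d
      = loopA k rest (tmp + left * (m - prev)) (left - idxs.length)
          m (idxs.foldl (fun d i => d.insert i 1) d) := by
  cases idxs with
  | nil => cases hne rfl
  | cons i is =>
    simp only [List.map_cons, List.cons_append, loopA, if_pos h, List.foldl_cons]
    rw [loopA_group_tail k m is rest _ _ _ h]
    congr 1
    simp only [List.length_cons]
    push_cast
    omega

-- the sorted pairs split as: the minimal-value group first, then the sorted rest
theorem sortA_min_decomp (R : List (Int × Int)) (hnd : (R.map (·.1)).Nodup) (m : Int)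
    (hmin : ∀ t ∈ R.map (·.2), m ≤ t) :
    sortA (R.map swapP)
      = sortA ((R.filter (fun q => q.2 == m)).map swapP)
        ++ sortA ((R.filter (fun q => !(q.2 == m))).map swapP) := by
  have hndAR : (R.map swapP).Nodup := by
    have h2 : ((R.map swapP).map (·.2)).Nodup := by
      rw [List.map_map]; exact hnd
    exact h2.of_map _
  have hF : (R.filter (fun q => q.2 == m)).map swapP
      = (R.map swapP).filter (fun q => q.1 == m) :=
    (@List.filter_map _ _ swapP (fun q => q.1 == m) R).symm
  have hR' : (R.filter (fun q => !(q.2 == m))).map swapP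
      = (R.map swapP).filter (fun q => !(q.1 == m)) :=
    (@List.filter_map _ _ swapP (fun q => !(q.1 == m)) R).symm
  rw [hF, hR']
  set AR := R.map swapP with hAR
  have hminAR : ∀ x ∈ AR, m ≤ x.1 := by
    intro x hx
    rcases List.mem_map.mp hx with ⟨q, hq, rfl⟩
    exact hmin _ (List.mem_map_of_mem hq)
  set G := sortA (AR.filter (fun q => q.1 == m)) with hG
  set T := sortA (AR.filter (fun q => !(q.1 == m))) with hT
  have hGperm : G.Perm (AR.filter (fun q => q.1 == m)) := PySem.List.sorted_perm _ _ _
  have hTperm : T.Perm (AR.filter (fun q => !(q.1 == m))) := PySem.List.sorted_perm _ _ _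
  have hGmem : ∀ x ∈ G, x.1 = m := by
    intro x hx
    have := List.of_mem_filter (hGperm.mem_iff.mp hx)
    simpa using this
  have hTmem : ∀ x ∈ T, m < x.1 := by
    intro x hx
    have hxf := hTperm.mem_iff.mp hx
    have hne : ¬(x.1 == m) = true := by simpa using List.of_mem_filter hxf
    have hle := hminAR x (List.mem_of_mem_filter hxf)
    rcases lt_or_eq_of_le hle with h | h
    · exact h
    · exact absurd (by simpa using h.symm) hne
  have pwlt : ∀ (l : List (Int × Int)), l.Nodup →
      l.Pairwise (fun a b => toLex a ≤ toLex b) →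
      l.Pairwise (fun a b => toLex a < toLex b) := by
    intro l hn hle
    exact (hle.and hn).imp (fun h => lt_of_le_of_ne h.1 (fun hc => h.2 (by simpa using hc)))
  have hGlt : G.Pairwise (fun a b => toLex a < toLex b) := by
    refine pwlt _ ?_ (PySem.List.sorted_pairwise _ _)
    exact hGperm.nodup_iff.mpr (hndAR.filter _)
  have hTlt : T.Pairwise (fun a b => toLex a < toLex b) := by
    refine pwlt _ ?_ (PySem.List.sorted_pairwise _ _)
    exact hTperm.nodup_iff.mpr (hndAR.filter _)
  have hperm : (G ++ T).Perm AR :=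
    (hGperm.append hTperm).trans (List.filter_append_perm _ AR)
  have hpw : (G ++ T).Pairwise (fun a b => toLex a < toLex b) := by
    rw [List.pairwise_append]
    refine ⟨hGlt, hTlt, fun a ha b hb => ?_⟩
    exact Prod.Lex.toLex_lt_toLex.mpr (Or.inl ((hGmem a ha) ▸ hTmem b hb))
  exact PySem.List.sorted_eq_of_perm_of_pairwise_lt AR (G ++ T) (fun x => toLex x) hperm hpw

-- MAIN: A's loop on the sorted pairs computes B's loop on the raw pairs
theorem main_loop : ∀ n (R : List (Int × Int)), R.length = n → (R.map (·.1)).Nodup →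
    ∀ (prev k tmp : Int) (d : PySem.Dict Int Int),
    (loopA k (sortA (R.map swapP)) tmp (R.length : Int) prev d).1 = k - (loopB R prev (k - tmp)).1 ∧
    (loopA k (sortA (R.map swapP)) tmp (R.length : Int) prev d).2.1 = ((loopB R prev (k - tmp)).2.length : Int) ∧
    (∀ j : Int, (loopA k (sortA (R.map swapP)) tmp (R.length : Int) prev d).2.2.contains j = true ↔
      (d.contains j = true ∨ (j ∈ R.map (·.1) ∧ j ∉ (loopB R prev (k - tmp)).2.map (·.1)))) := by
  intro n
  induction n using Nat.strong_induction_on with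
  | _ n ih =>
    intro R hlen hnd prev k tmp d
    cases R with
    | nil =>
      simp only [List.map_nil, show sortA ([] : List (Int × Int)) = [] from rfl, loopA, loopB,
        List.length_nil, Nat.cast_zero]
      exact ⟨by omega, by trivial, fun j => by simp⟩
    | cons p rest =>
      obtain ⟨mv, hmo⟩ : ∃ mv, PySem.List.min? ((p :: rest).map (·.2)) (fun t => t) = some mv := by
        cases h : PySem.List.min? ((p :: rest).map (·.2)) (fun t => t)
        · exact absurd h (by simp [PySem.List.min?_eq_none_iff])
        · exact ⟨_, rfl⟩
      have hmin : ∀ t ∈ (p :: rest).map (·.2), mv ≤ t := PySem.List.min?_isMin hmo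
      rcases List.mem_map.mp (PySem.List.min?_mem hmo) with ⟨qm, hqm, hqm2⟩
      have hBstep : loopB (p :: rest) prev (k - tmp)
          = if (k - tmp) < ((p :: rest).length : Int) * (mv - prev) then (k - tmp, p :: rest)
            else loopB ((p :: rest).filter (fun q => !(q.2 == mv))) mv
              ((k - tmp) - ((p :: rest).length : Int) * (mv - prev)) := by
        rw [loopB]
        simp only [List.map_cons] at hmo
        simp [hmo]
      set F := (p :: rest).filter (fun q => q.2 == mv) with hFdef
      set R' := (p :: rest).filter (fun q => !(q.2 == mv)) with hR'def
      have hdec := sortA_min_decomp (p :: rest) hnd mv hmin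
      set G := sortA (F.map swapP) with hGdef
      have hGfst : ∀ x ∈ G, x.1 = mv := by
        intro x hx
        have hx' := (PySem.List.sorted_perm (F.map swapP) (fun y => toLex y) false).mem_iff.mp hx
        rcases List.mem_map.mp hx' with ⟨q, hq, rfl⟩
        rw [hFdef] at hq
        simpa [swapP] using (by simpa using List.of_mem_filter hq : (q.2 == mv) = true)
      have hGform : G = (G.map (·.2)).map (fun i => (mv, i)) := eq_map_of_fst_const G mv hGfst
      have hGsnd_perm : (G.map (·.2)).Perm (F.map (·.1)) := by
        have h := (PySem.List.sorted_perm (F.map swapP) (fun y => toLex y) false).map (·.2)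
        simpa [List.map_map] using h
      have hGlen : G.length = F.length := by
        rw [hGdef]
        simp [sortA]
      have hqmF : qm ∈ F := List.mem_filter.mpr ⟨hqm, by simp [hqm2]⟩
      have hGne : G ≠ [] := by
        intro h
        have h0 : F.map swapP = [] := (PySem.List.sorted_eq_nil_iff _ _ _).mp h
        rw [List.map_eq_nil_iff] at h0
        rw [h0] at hqmF
        exact List.not_mem_nil hqmF
      have hidxne : (G.map (·.2)) ≠ [] := by
        intro h
        exact hGne (List.map_eq_nil_iff.mp h)
      have hlenpart : F.length + R'.length = (p :: rest).length := by
        have h := (List.filter_append_perm (fun q => q.2 == mv) (p :: rest)).length_eq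
        simpa [List.length_append] using h
      have hndR' : (R'.map (·.1)).Nodup := by
        rw [hR'def]
        exact (List.Sublist.map (fun q : Int × Int => q.1)
          (List.filter_sublist (p := fun q => !(q.2 == mv)))).nodup hnd
      have hR'lt : R'.length < (p :: rest).length :=
        List.length_filter_lt_length_iff_exists.mpr ⟨qm, hqm, by simp [hqm2]⟩
      have hdisj : ∀ j, j ∈ F.map (·.1) → j ∈ R'.map (·.1) → False := by
        intro j hjF hjR'
        rcases List.mem_map.mp hjF with ⟨q1, hq1, hj1⟩
        rcases List.mem_map.mp hjR' with ⟨q2, hq2, hj2⟩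
        rw [hFdef] at hq1
        rw [hR'def] at hq2
        have hq1m : (q1.2 == mv) = true := List.of_mem_filter (p := fun q : Int × Int => q.2 == mv) hq1
        have hq2m : (!(q2.2 == mv)) = true :=
          List.of_mem_filter (p := fun q : Int × Int => !(q.2 == mv)) hq2
        have heq : q1 = q2 :=
          List.inj_on_of_nodup_map hnd (List.mem_of_mem_filter hq1)
            (List.mem_of_mem_filter hq2) (hj1.trans hj2.symm)
        
        rw [heq] at hq1m
        simp [hq1m] at hq2m
      have hsplit : ∀ j, j ∈ (p :: rest).map (·.1) ↔ j ∈ F.map (·.1) ∨ j ∈ R'.map (·.1) := by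
        intro j
        have hp := (List.filter_append_perm (fun q => q.2 == mv) (p :: rest)).map (·.1)
        rw [← hp.mem_iff, List.map_append, List.mem_append]
      by_cases hc : (k - tmp) < ((p :: rest).length : Int) * (mv - prev)
      · obtain ⟨g0, G', hGcons⟩ := List.exists_cons_of_ne_nil hGne
        have hg0 : g0.1 = mv := hGfst _ (by rw [hGcons]; exact List.mem_cons_self ..)
        have hAstep : loopA k (sortA ((p :: rest).map swapP)) tmp ((p :: rest).length : Int) prev d
            = (tmp, ((p :: rest).length : Int), d) := by
          rw [hdec, hGcons]
          obtain ⟨v0, i0⟩ := g0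
          simp only at hg0
          subst hg0
          simp only [List.cons_append, loopA]
          rw [if_neg (by intro hle; linarith)]
        rw [hAstep, hBstep, if_pos hc]
        refine ⟨by omega, rfl, fun j => by tauto⟩
      · have hcost : tmp + ((p :: rest).length : Int) * (mv - prev) ≤ k := by
          have := not_lt.mp hc
          linarith
        have hAgrp : loopA k (sortA ((p :: rest).map swapP)) tmp ((p :: rest).length : Int) prev d
            = loopA k (sortA (R'.map swapP)) (tmp + ((p :: rest).length : Int) * (mv - prev))
                (((p :: rest).length : Int) - ((G.map (·.2)).length : Int)) mv
                ((G.map (·.2)).foldl (fun d i => d.insert i 1) d) := by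
          rw [hdec]
          conv_lhs => rw [hGform]
          exact loopA_group k mv prev (G.map (·.2)) hidxne _ tmp _ d hcost
        have hleft' : ((p :: rest).length : Int) - ((G.map (·.2)).length : Int) = (R'.length : Int) := by
          simp only [List.length_map, hGlen]
          omega
        rw [hleft'] at hAgrp
        have hIH := ih R'.length (hlen ▸ hR'lt) R' rfl hndR' mv k
          (tmp + ((p :: rest).length : Int) * (mv - prev))
          ((G.map (·.2)).foldl (fun d i => d.insert i 1) d)
        have harg : k - (tmp + ((p :: rest).length : Int) * (mv - prev))
            = (k - tmp) - ((p :: rest).length : Int) * (mv - prev) := by ring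
        rw [harg] at hIH
        obtain ⟨ih1, ih2, ih3⟩ := hIH
        rw [hBstep, if_neg hc]
        refine ⟨?_, ?_, ?_⟩
        · rw [hAgrp, ih1]
        · rw [hAgrp, ih2]
        · intro j
          rw [hAgrp, ih3 j, contains_foldl_insert]
          have h1 : j ∈ G.map (·.2) ↔ j ∈ F.map (·.1) := hGsnd_perm.mem_iff
          have h2 := hsplit j
          have h3 : j ∈ F.map (·.1) →
              j ∈ (loopB R' mv ((k - tmp) - ((p :: rest).length : Int) * (mv - prev))).2.map (·.1) → False :=
            fun hF hR2 => hdisj j hF (((loopB_sublist R' mv _).map (·.1)).subset hR2)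
          constructor
          · rintro ((hd | hG) | ⟨hr', hnr2⟩)
            · exact Or.inl hd
            · refine Or.inr ⟨h2.mpr (Or.inl (h1.mp hG)), fun hR2 => h3 (h1.mp hG) hR2⟩
            · exact Or.inr ⟨h2.mpr (Or.inr hr'), hnr2⟩
          · rintro (hd | ⟨hR, hnr2⟩)
            · exact Or.inl (Or.inl hd)
            · rcases h2.mp hR with hF | hr'
              · exact Or.inl (Or.inr (h1.mpr hF))
              · exact Or.inr ⟨hr', hnr2⟩

-- A's final scan returns survivor number t (0-based), counting from now+1
theorem scanA_eq : ∀ (l : List Nat) (d : PySem.Dict Int Int) (now : Int) (t : Nat),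
    t < ((l.map Int.ofNat).filter (fun j => !d.contains j)).length →
    scanA d (now + 1 + t) l now (-1)
      = ((l.map Int.ofNat).filter (fun j => !d.contains j)).getD t 0 + 1 := by
  intro l
  induction l with
  | nil => intro d now t ht; simp at ht
  | cons i l' ih =>
    intro d now t ht
    by_cases hdi : d.contains (i : Int) = true
    · rw [show scanA d (now + 1 + t) (i :: l') now (-1) = scanA d (now + 1 + t) l' now (-1) by
        simp [scanA, hdi]]
      have hrw : ((List.map Int.ofNat (i :: l')).filter (fun j => !d.contains j))
          = ((List.map Int.ofNat l').filter (fun j => !d.contains j)) := by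
        simp [Int.ofNat_eq_natCast, hdi]
      rw [hrw] at ht ⊢
      exact ih d now t ht
    · have hdi' : d.contains (i : Int) = false := by simpa using hdi
      have hsc : scanA d (now + 1 + t) (i :: l') now (-1)
          = if now + 1 = now + 1 + t then (i : Int) + 1
            else scanA d (now + 1 + t) l' (now + 1) (-1) := by
        simp [scanA, hdi]
      cases t with
      | zero =>
        rw [hsc]
        simp [Int.ofNat_eq_natCast, hdi']
      | succ t' =>
        rw [hsc, if_neg (by omega)]
        rw [show now + 1 + ((t' : Nat) + 1 : Nat) = (now + 1) + 1 + t' by push_cast; ring]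
        simp only [List.map_cons, List.filter_cons, Int.ofNat_eq_natCast, hdi', Bool.not_false,
          if_pos, List.length_cons, List.getD_cons_succ] at ht ⊢
        exact ih d (now + 1) t' (by omega)

-- filtering a nodup list down to membership in one of its sublists recovers the sublist
theorem filter_mem_sublist {l s : List Int} (hs : s.Sublist l) (hn : l.Nodup) :
    l.filter (fun j => decide (j ∈ s)) = s := by
  revert hn
  induction hs with
  | slnil => intro _; rfl
  | @cons s' l' a hs ih =>
    intro hn
    have hnl : a ∉ l' := (List.nodup_cons.mp hn).1
    have hna : a ∉ s' := fun h => hnl (hs.subset h)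
    rw [List.filter_cons, if_neg (by simpa using hna)]
    exact ih (List.nodup_cons.mp hn).2
  | @cons₂ s' l' a hs ih =>
    intro hn
    have hnl : a ∉ l' := (List.nodup_cons.mp hn).1
    rw [List.filter_cons, if_pos (by simp)]
    congr 1
    rw [List.filter_congr (fun x hx => ?_)]
    · exact ih (List.nodup_cons.mp hn).2
    · simp only [decide_eq_decide, List.mem_cons]
      constructor
      · rintro (rfl | h)
        · exact absurd hx hnl
        · exact h
      · exact Or.inr

-- ===== VERDICT (by name: the statement is the Claim_ definition above) =====
theorem solution_spec : Claim_equal_solution := by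
  unfold Claim_equal_solution Spec_solution
  intro ft k _hdom
  have hpairs : (List.range ft.length).map (fun i : Nat => (PySem.List.pyGetD ft (i : Int) 0, (i : Int)))
      = (PySem.List.enumerate ft).map swapP := by
    apply List.ext_getElem
    · simp [PySem.List.length_enumerate]
    · intro idx h1 h2
      have hidx : idx < (PySem.List.enumerate ft).length := by
        simpa [PySem.List.length_enumerate] using (by simpa using h1)
      simp only [List.getElem_map, List.getElem_range]
      rw [PySem.List.getElem_enumerate ft 0 idx hidx]
      have hidx' : idx < ft.length := by simpa [PySem.List.length_enumerate] using hidx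
      simp [swapP, List.getElem?_eq_getElem hidx']
  have hnd : ((PySem.List.enumerate ft).map (·.1)).Nodup := by
    rw [PySem.List.map_fst_enumerate, zero_add, PySem.List.pyRange_zero_natCast]
    exact (List.nodup_range).map (fun a b h => by exact_mod_cast h)
  obtain ⟨h1, h2, h3⟩ := main_loop (PySem.List.enumerate ft).length (PySem.List.enumerate ft)
    rfl hnd 0 k 0 PySem.Dict.empty
  simp only [sortA, sub_zero, PySem.List.length_enumerate] at h1 h2 h3
  rw [← hpairs] at h1 h2 h3
  rcases hA : loopA k (PySem.List.sorted ((List.range ft.length).map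
      (fun i : Nat => (PySem.List.pyGetD ft (i : Int) 0, (i : Int)))) (fun x => toLex x) false)
      0 (ft.length : Int) 0 PySem.Dict.empty with ⟨tmp, lf, dd⟩
  rcases hB : loopB (PySem.List.enumerate ft) 0 k with ⟨k2, R2⟩
  rw [hA, hB] at h1 h2 h3
  simp only at h1 h2 h3
  simp only [solution, solution_alt, hA, hB]
  have hk : k - tmp = k2 := by omega
  rw [hk, h2]
  by_cases hcond : k2 < 0 ∨ R2 = []
  · rw [if_pos (by rcases hcond with h | h; exacts [Or.inl h, Or.inr (by simp [h])]),
      if_pos hcond]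
  · have hk2 : ¬ k2 < 0 := fun h => hcond (Or.inl h)
    have hR2ne : R2 ≠ [] := fun h => hcond (Or.inr h)
    have hlen0 : 0 < R2.length := List.length_pos_iff.mpr hR2ne
    rw [if_neg (by
      rintro (h | h)
      · exact hk2 h
      · exact hR2ne (by simpa using List.length_eq_zero_iff.mp (by omega))), if_neg hcond]
    have hlen0' : (0 : Int) < (R2.length : Int) := by exact_mod_cast hlen0
    set kk := PySem.Int.mod k2 (R2.length : Int) with hkk
    have hkk0 : 0 ≤ kk := PySem.Int.mod_nonneg k2 hlen0'
    have hkklt : kk < (R2.length : Int) := PySem.Int.mod_lt k2 hlen0'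
    -- the survivors of A's scan, in order, are exactly the first components of R2
    have hfil : ((List.range ft.length).map Int.ofNat).filter (fun j => !dd.contains j)
        = R2.map (·.1) := by
      have hsub : (R2.map (·.1)).Sublist ((List.range ft.length).map Int.ofNat) := by
        have hs := (loopB_sublist (PySem.List.enumerate ft) 0 k).map (·.1)
        rw [hB] at hs
        simp only at hs
        rw [PySem.List.map_fst_enumerate, zero_add, PySem.List.pyRange_zero_natCast] at hs
        simpa [Int.ofNat_eq_natCast] using hs
      have hnodup : (((List.range ft.length).map Int.ofNat)).Nodup :=
        (List.nodup_range).map (fun a b h => Int.ofNat.inj h)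
      rw [List.filter_congr (fun j hj => ?_)]
      · exact filter_mem_sublist hsub hnodup
      · have hjP : j ∈ (PySem.List.enumerate ft).map (·.1) := by
          rw [PySem.List.map_fst_enumerate, zero_add, PySem.List.pyRange_zero_natCast]
          simpa [Int.ofNat_eq_natCast] using hj
        by_cases hm : j ∈ R2.map (·.1)
        · have hcf : dd.contains j = false := by
            rcases hq : dd.contains j
            · rfl
            · rcases (h3 j).mp hq with hq' | hq'
              · simp at hq'
              · exact absurd hm hq'.2
          simp [hcf, hm]
        · have hct : dd.contains j = true := (h3 j).mpr (Or.inr ⟨hjP, hm⟩)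
          simp [hct, hm]
    have hbound : kk.toNat < (((List.range ft.length).map Int.ofNat).filter
        (fun j => !dd.contains j)).length := by
      rw [hfil, List.length_map]
      omega
    have hscan := scanA_eq (List.range ft.length) dd (-1) kk.toNat hbound
    rw [show (-1 : Int) + 1 + (kk.toNat : Int) = kk by omega] at hscan
    rw [hscan, hfil]
    have hkkn : kk.toNat < R2.length := by omega
    rw [List.getD_eq_getElem _ _ (by simpa using hkkn), List.getElem_map]
    have hget : PySem.List.pyGet? R2 kk = some R2[kk.toNat] :=
      PySem.List.pyGet?_eq_some_getElem R2 hkk0 hkklt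
    rw [hget]
    rfl
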